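-- pv_equiv track=rewrite | github.com/mateozorzi/TDA | RPL_2024/3.ProgrDinamica/ej13.py | calculoOptimos
-- ===== SOURCE A (Python) =====
-- def calculoOptimos(P,W):
--     optimos = [[0] *(W+1) for i in range(len(P)+1) ]
--
--     for i in range(1,len(optimos)):
--         for j in range(1,W+1):
--             if P[i-1] > j:
--                 optimos[i][j] = optimos[i-1][j]
--             else:
--                 optimos[i][j] = max(optimos[i-1][j],
--                                   optimos[i-1][j-P[i-1]] + P[i-1])
--
--     return optimos
-- ===== SOURCE B (Python) =====
-- def calculoOptimos(P, W):
--     # With value == weight, optimos[i][j] is the largest achievable subset sum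
--     # <= j over the first i items: maintain the set of reachable subset sums
--     # and build each row by a running-max sweep over j.
--     reach = {0}
--
--     def row():
--         out = []
--         best = 0  # 0 is always reachable
--         for j in range(W + 1):
--             if j in reach:
--                 best = j
--             out.append(best)
--         return out
--
--     rows = [row()]
--     for p in P:
--         reach |= {s + p for s in reach if s + p <= W}
--         rows.append(row())
--     return rows
-- ===== Notes on version B (the rewrite author's own statement) =====
-- stated objective: alternative
-- what changed: Replaces the cell-by-cell knapsack max-recurrence with a per-prefix set of reachable subset sums (value = weight); each row is a single running-max sweep over 0..W testing membership in that set.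
import Mathlib
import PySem

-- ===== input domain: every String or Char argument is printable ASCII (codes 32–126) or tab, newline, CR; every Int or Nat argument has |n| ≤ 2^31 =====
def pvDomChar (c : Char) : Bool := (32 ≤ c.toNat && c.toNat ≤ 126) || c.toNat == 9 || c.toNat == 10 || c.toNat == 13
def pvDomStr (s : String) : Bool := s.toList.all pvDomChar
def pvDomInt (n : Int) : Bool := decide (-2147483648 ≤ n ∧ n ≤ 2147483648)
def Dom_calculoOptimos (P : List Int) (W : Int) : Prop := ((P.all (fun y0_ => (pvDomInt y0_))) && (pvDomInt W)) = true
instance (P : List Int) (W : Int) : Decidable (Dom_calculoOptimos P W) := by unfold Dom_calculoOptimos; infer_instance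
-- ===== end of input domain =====

-- B replaces the knapsack DP recurrence (value = weight) by a per-prefix set of
-- reachable subset sums with a running-max row sweep; objective: alternative algorithm.

-- ===== PORT A =====
-- Inner loop of A: row i starts as [0]*(W+1) (first cell written below is absent when
-- W+1 <= 0) and cells j = 1..W are each assigned exactly once, in increasing j order,
-- rendered here as appends to the row being built; reads of row i-1 use the total
-- pyGetD (indices are in range on every input Pre_ admits).
def pvRowA (prev : List Int) (W p : Int) : List Int :=
  (PySem.List.pyRange 1 (W + 1) 1).foldl
    (fun row j =>
      if p > j then row ++ [PySem.List.pyGetD prev j 0]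
      else row ++ [max (PySem.List.pyGetD prev j 0) (PySem.List.pyGetD prev (j - p) 0 + p)])
    (if W < 0 then [] else [0])

-- Outer loop: for i in range(1, len(P)+1), row i is computed from row i-1 and P[i-1];
-- folding over P carries (rows built so far, previous row).
def calculoOptimos (P : List Int) (W : Int) : List (List Int) :=
  (P.foldl
    (fun (st : List (List Int) × List Int) p =>
      let r := pvRowA st.2 W p
      (st.1 ++ [r], r))
    ([List.replicate (W + 1).toNat 0], List.replicate (W + 1).toNat 0)).1

-- ===== PORT B =====
-- row(): running-max sweep, best = largest reachable sum seen so far.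
def pvRowB (reach : PySem.Set Int) (W : Int) : List Int :=
  ((PySem.List.pyRange 0 (W + 1) 1).foldl
    (fun (st : List Int × Int) j =>
      if PySem.Set.contains reach j then (st.1 ++ [j], j)
      else (st.1 ++ [st.2], st.2))
    ([], 0)).1

-- reach |= {s + p for s in reach if s + p <= W}
def pvStep (reach : PySem.Set Int) (p W : Int) : PySem.Set Int :=
  PySem.Set.update reach ((reach.filter (fun s => decide (s + p ≤ W))).map (fun s => s + p))

def calculoOptimos_alt (P : List Int) (W : Int) : List (List Int) :=
  (P.foldl
    (fun (st : List (List Int) × PySem.Set Int) p =>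
      let r := pvStep st.2 p W
      (st.1 ++ [pvRowB r W], r))
    ([pvRowB (PySem.Set.ofList [0]) W], PySem.Set.ofList [0])).1

-- ===== PRECONDITION & SPEC =====
-- Pre_ is exactly the set of inputs on which A returns: with some negative weight and
-- W >= 1, A's read optimos[i-1][j-P[i-1]] hits an index > W and raises IndexError.
def Pre_calculoOptimos (P : List Int) (W : Int) : Prop :=
  (∀ p ∈ P, 0 ≤ p) ∨ W < 1
instance (P : List Int) (W : Int) : Decidable (Pre_calculoOptimos P W) := by
  unfold Pre_calculoOptimos; infer_instance

def pvWitness_calculoOptimos : List Int × Int := ([2, 3, 4], 6)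

def Spec_calculoOptimos (P : List Int) (W : Int) (out : List (List Int)) : Prop := out = calculoOptimos_alt P W
instance (P : List Int) (W : Int) (out : List (List Int)) : Decidable (Spec_calculoOptimos P W out) := by unfold Spec_calculoOptimos; infer_instance

-- ===== CLAIM (what is proved, stated in full; the proofs are below) =====
def Claim_equal_calculoOptimos : Prop := ∀ (P : List Int) (W : Int), Dom_calculoOptimos P W → Pre_calculoOptimos P W → Spec_calculoOptimos P W (calculoOptimos P W)

-- ===== LEMMAS AND PROOFS =====

-- The greatest element of L that is ≤ j (0 when none): the value of every cell of B's rows.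
def pvF (L : List Int) (j : Int) : Int :=
  (PySem.List.max? (L.filter (fun s => decide (s ≤ j))) (fun x => x)).getD 0

-- pvF L j is the greatest element of L that is ≤ j, provided 0 ∈ L and 0 ≤ j.
theorem pvF_spec (L : List Int) (j : Int) (h0 : (0:Int) ∈ L) (hj : 0 ≤ j) :
    pvF L j ∈ L ∧ pvF L j ≤ j ∧ ∀ s ∈ L, s ≤ j → s ≤ pvF L j := by
  unfold pvF
  have hmem : (0:Int) ∈ L.filter (fun s => decide (s ≤ j)) := by
    simp [List.mem_filter, h0, hj]
  cases hmax : PySem.List.max? (L.filter (fun s => decide (s ≤ j))) (fun x => x) with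
  | none =>
    rw [PySem.List.max?_eq_none_iff] at hmax
    simp [hmax] at hmem
  | some m =>
    have hm := PySem.List.max?_mem hmax
    have hM := PySem.List.max?_isMax hmax
    simp only [List.mem_filter, decide_eq_true_eq] at hm
    refine ⟨hm.1, hm.2, fun s hs hsj => ?_⟩
    exact hM s (by simp [List.mem_filter, hs, hsj])

theorem pvF_eq_zero (L : List Int) (j : Int) (h0 : (0:Int) ∈ L) (hj : 0 ≤ j)
    (hub : ∀ s ∈ L, s ≤ j → s ≤ 0) : pvF L j = 0 := by
  obtain ⟨hmem, hle, hmax⟩ := pvF_spec L j h0 hj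
  exact le_antisymm (hub _ hmem hle) (hmax 0 h0 hj)

theorem pvF_of_mem (L : List Int) (m : Int) (h0 : (0:Int) ∈ L) (hm : m ∈ L)
    (hm0 : 0 ≤ m) : pvF L m = m := by
  obtain ⟨_, hle, hmax⟩ := pvF_spec L m h0 hm0
  exact le_antisymm hle (hmax m hm le_rfl)

theorem pvF_of_not_mem (L : List Int) (m : Int) (hm : m ∉ L) :
    pvF L m = pvF L (m - 1) := by
  unfold pvF
  congr 2
  apply List.filter_congr
  intro s hs
  have : s ≠ m := fun h => hm (h ▸ hs)
  simp only [decide_eq_decide]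
  omega

-- B's sweep produces exactly the greatest-reachable-sum-≤-j row.
theorem pvRowB_loop (L : PySem.Set Int) (h0 : (0:Int) ∈ L) (m : Int) (hm : 0 ≤ m) :
    (PySem.List.pyRange 0 m 1).foldl
      (fun (st : List Int × Int) j =>
        if PySem.Set.contains L j then (st.1 ++ [j], j)
        else (st.1 ++ [st.2], st.2))
      ([], 0) =
    ((PySem.List.pyRange 0 m 1).map (fun j => pvF L j),
      if m = 0 then 0 else pvF L (m - 1)) := by
  induction m, hm using Int.le_induction with
  | base => simp [PySem.List.pyRange_one_eq_nil (by omega : (0:Int) ≤ 0)]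
  | succ n hn ih =>
    rw [PySem.List.pyRange_one_succ_right (by omega), List.foldl_append, ih,
      List.map_append, List.foldl_cons, List.foldl_nil]
    by_cases hc : PySem.Set.contains L n
    · rw [if_pos hc]
      have hnL : n ∈ L := (PySem.Set.contains_iff L n).1 hc
      simp [show ¬ (n + 1 = 0) by omega, pvF_of_mem L n h0 hnL hn]
    · rw [if_neg hc]
      have hnL : n ∉ L := fun h => hc ((PySem.Set.contains_iff L n).2 h)
      have hn1 : n ≠ 0 := fun h => hnL (h ▸ h0)
      simp [hn1, show ¬ (n + 1 = 0) by omega, pvF_of_not_mem L n hnL]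

theorem pvRowB_eq_map (L : PySem.Set Int) (W : Int) (h0 : (0:Int) ∈ L) :
    pvRowB L W = (PySem.List.pyRange 0 (W + 1) 1).map (fun j => pvF L j) := by
  unfold pvRowB
  by_cases hW : 0 ≤ W + 1
  · rw [pvRowB_loop L h0 (W + 1) hW]
  · rw [PySem.List.pyRange_one_eq_nil (by omega)]
    simp

theorem mem_pvStep (L : PySem.Set Int) (p W x : Int) :
    x ∈ pvStep L p W ↔ x ∈ L ∨ ∃ s ∈ L, s + p ≤ W ∧ x = s + p := by
  unfold pvStep
  rw [PySem.Set.mem_update]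
  simp only [List.mem_map, List.mem_filter, decide_eq_true_eq]
  constructor
  · rintro (h | ⟨s, ⟨hs, hsW⟩, rfl⟩)
    · exact Or.inl h
    · exact Or.inr ⟨s, hs, hsW, rfl⟩
  · rintro (h | ⟨s, hs, hsW, rfl⟩)
    · exact Or.inl h
    · exact Or.inr ⟨s, ⟨hs, hsW⟩, rfl⟩

-- One cell of A's recurrence equals the greatest reachable sum ≤ j after the item.
theorem pvCell (L : PySem.Set Int) (W p j : Int)
    (h0 : (0:Int) ∈ L) (hnn : ∀ s ∈ L, 0 ≤ s) (h1 : 1 ≤ j) (hW : j ≤ W) :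
    (if p > j then pvF L j else max (pvF L j) (pvF L (j - p) + p)) = pvF (pvStep L p W) j := by
  have hj : (0:Int) ≤ j := by omega
  have h0' : (0:Int) ∈ pvStep L p W := (mem_pvStep L p W 0).2 (Or.inl h0)
  obtain ⟨hm', hle', hmax'⟩ := pvF_spec (pvStep L p W) j h0' hj
  obtain ⟨hmL, hleL, hmaxL⟩ := pvF_spec L j h0 hj
  apply le_antisymm
  · -- A's cell ≤ pvF L' j
    have hbase : pvF L j ≤ pvF (pvStep L p W) j :=
      hmax' _ ((mem_pvStep L p W _).2 (Or.inl hmL)) hleL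
    split_ifs with hpj
    · exact hbase
    · rw [not_lt] at hpj
      refine max_le hbase ?_
      obtain ⟨hmL2, hleL2, _⟩ := pvF_spec L (j - p) h0 (by omega)
      exact hmax' _ ((mem_pvStep L p W _).2 (Or.inr ⟨_, hmL2, by omega, rfl⟩)) (by omega)
  · -- pvF L' j ≤ A's cell
    rcases (mem_pvStep L p W _).1 hm' with h | ⟨s, hs, hsW, heq⟩
    · have := hmaxL _ h hle'
      split_ifs <;> [exact this; exact le_max_of_le_left this]
    · have hs0 := hnn s hs
      have hpj : ¬ p > j := by omega
      obtain ⟨_, _, hmax2⟩ := pvF_spec L (j - p) h0 (by omega)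
      have : s ≤ pvF L (j - p) := hmax2 s hs (by omega)
      rw [if_neg hpj]
      exact le_max_of_le_right (by omega)

-- One outer iteration of A, fed B's row for the current reachable set, produces
-- B's row for the updated reachable set.
theorem pvRow_eq (L : PySem.Set Int) (W p : Int)
    (h0 : (0:Int) ∈ L) (hnn : ∀ s ∈ L, 0 ≤ s) (hp : 0 ≤ p) :
    pvRowA (pvRowB L W) W p = pvRowB (pvStep L p W) W := by
  have h0' : (0:Int) ∈ pvStep L p W := (mem_pvStep L p W 0).2 (Or.inl h0)
  have hnn' : ∀ s ∈ pvStep L p W, 0 ≤ s := by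
    intro s hs
    rcases (mem_pvStep L p W s).1 hs with h | ⟨t, ht, _, rfl⟩
    · exact hnn s h
    · have := hnn t ht; omega
  unfold pvRowA
  have hbody : (fun (row : List Int) (j : Int) =>
      if p > j then row ++ [PySem.List.pyGetD (pvRowB L W) j 0]
      else row ++ [max (PySem.List.pyGetD (pvRowB L W) j 0)
                       (PySem.List.pyGetD (pvRowB L W) (j - p) 0 + p)]) =
      (fun row j => row ++ [if p > j then PySem.List.pyGetD (pvRowB L W) j 0
      else max (PySem.List.pyGetD (pvRowB L W) j 0)
               (PySem.List.pyGetD (pvRowB L W) (j - p) 0 + p)]) := by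
    funext row j; split <;> rfl
  rw [hbody, PySem.List.foldl_append_singleton_eq_map, pvRowB_eq_map (pvStep L p W) W h0']
  by_cases hW : W < 0
  · rw [PySem.List.pyRange_one_eq_nil (by omega), PySem.List.pyRange_one_eq_nil (by omega)]
    simp [hW]
  · rw [not_lt] at hW
    rw [if_neg (by omega), PySem.List.pyRange_one_cons (by omega : (0:Int) < W + 1)]
    rw [List.map_cons, zero_add]
    have hcell0 : pvF (pvStep L p W) 0 = 0 :=
      pvF_eq_zero _ 0 h0' le_rfl (fun s _ h => h)
    rw [hcell0, List.singleton_append]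
    congr 1
    apply List.map_congr_left
    intro j hj
    rw [PySem.List.mem_pyRange_one] at hj
    have hget : PySem.List.pyGetD (pvRowB L W) j 0 = pvF L j := by
      rw [pvRowB_eq_map L W h0,
        PySem.List.pyGetD_map_pyRange_of_nonneg _ _ _ _ (by omega) (by omega)]
    have hget2 : ¬ p > j → PySem.List.pyGetD (pvRowB L W) (j - p) 0 = pvF L (j - p) := by
      intro h
      rw [pvRowB_eq_map L W h0,
        PySem.List.pyGetD_map_pyRange_of_nonneg _ _ _ _ (by omega) (by omega)]
    rw [← pvCell L W p j h0 hnn (by omega) (by omega)]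
    split_ifs with hpj
    · exact hget
    · rw [hget, hget2 hpj]

-- B's row for the initial reachable set {0} is A's row of zeros.
theorem pvRowB_zero (W : Int) :
    List.replicate (W + 1).toNat 0 = pvRowB (PySem.Set.ofList [0]) W := by
  rw [pvRowB_eq_map _ _ (by decide)]
  have : ∀ j ∈ PySem.List.pyRange 0 (W + 1) 1, pvF (PySem.Set.ofList [0]) j = 0 := by
    intro j hj
    rw [PySem.List.mem_pyRange_one] at hj
    exact pvF_eq_zero _ j (by decide) hj.1
      (by intro s hs _; rw [PySem.Set.mem_ofList, List.mem_singleton] at hs; omega)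
  rw [List.map_congr_left this]
  rw [List.map_const', PySem.List.length_pyRange_one]
  simp

-- Fold equality for the case of nonnegative weights.
theorem pvFold_nonneg (W : Int) (P : List Int) (hP : ∀ p ∈ P, 0 ≤ p)
    (acc : List (List Int)) (L : PySem.Set Int)
    (h0 : (0:Int) ∈ L) (hnn : ∀ s ∈ L, 0 ≤ s) :
    (P.foldl (fun (st : List (List Int) × List Int) p =>
        let r := pvRowA st.2 W p
        (st.1 ++ [r], r)) (acc, pvRowB L W)).1 =
    (P.foldl (fun (st : List (List Int) × PySem.Set Int) p =>
        let r := pvStep st.2 p W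
        (st.1 ++ [pvRowB r W], r)) (acc, L)).1 := by
  induction P generalizing acc L with
  | nil => rfl
  | cons p P ih =>
    have hp : (0:Int) ≤ p := hP p (List.mem_cons_self ..)
    simp only [List.foldl_cons]
    rw [pvRow_eq L W p h0 hnn hp]
    refine ih (fun q hq => hP q (List.mem_cons_of_mem _ hq)) _ _
      ((mem_pvStep L p W 0).2 (Or.inl h0)) ?_
    intro s hs
    rcases (mem_pvStep L p W s).1 hs with h | ⟨t, ht, _, rfl⟩
    · exact hnn s h
    · have := hnn t ht; omega

-- In the case W < 1 both programs produce only all-zero rows.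
theorem pvRowA_neg (prev : List Int) (W p : Int) (hW : W < 1) :
    pvRowA prev W p = List.replicate (W + 1).toNat 0 := by
  unfold pvRowA
  rw [PySem.List.pyRange_one_eq_nil (by omega)]
  by_cases h : W < 0
  · simp [h, Int.toNat_of_nonpos (by omega : W + 1 ≤ 0)]
  · have : W = 0 := by omega
    simp [this]

theorem pvRowB_neg (L : PySem.Set Int) (W : Int) (hW : W < 1)
    (h0 : (0:Int) ∈ L) (hle : ∀ s ∈ L, s ≤ 0) :
    pvRowB L W = List.replicate (W + 1).toNat 0 := by
  rw [pvRowB_eq_map L W h0]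
  by_cases h : W < 0
  · rw [PySem.List.pyRange_one_eq_nil (by omega)]
    simp [Int.toNat_of_nonpos (by omega : W + 1 ≤ 0)]
  · have hW0 : W = 0 := by omega
    subst hW0
    rw [PySem.List.pyRange_one_cons (by omega), PySem.List.pyRange_one_eq_nil (by omega)]
    simp only [List.map_cons, List.map_nil]
    rw [pvF_eq_zero _ 0 h0 le_rfl (fun s hs _ => hle s hs)]
    rfl

theorem pvFold_neg (W : Int) (hW : W < 1) (P : List Int)
    (acc : List (List Int)) (L : PySem.Set Int)
    (h0 : (0:Int) ∈ L) (hle : ∀ s ∈ L, s ≤ 0) :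
    (P.foldl (fun (st : List (List Int) × List Int) p =>
        let r := pvRowA st.2 W p
        (st.1 ++ [r], r)) (acc, pvRowB L W)).1 =
    (P.foldl (fun (st : List (List Int) × PySem.Set Int) p =>
        let r := pvStep st.2 p W
        (st.1 ++ [pvRowB r W], r)) (acc, L)).1 := by
  induction P generalizing acc L with
  | nil => rfl
  | cons p P ih =>
    simp only [List.foldl_cons]
    have hinv' : (0:Int) ∈ pvStep L p W ∧ ∀ s ∈ pvStep L p W, s ≤ 0 := by
      refine ⟨(mem_pvStep L p W 0).2 (Or.inl h0), fun s hs => ?_⟩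
      rcases (mem_pvStep L p W s).1 hs with h | ⟨t, ht, hle2, rfl⟩
      · exact hle s h
      · omega
    rw [pvRowA_neg (pvRowB L W) W p hW,
      ← pvRowB_neg (pvStep L p W) W hW hinv'.1 hinv'.2]
    exact ih _ _ hinv'.1 hinv'.2

-- ===== VERDICT (by name: the statement is the Claim_ definition above) =====
theorem calculoOptimos_spec : Claim_equal_calculoOptimos := by
  intro P W _ hPre
  unfold Spec_calculoOptimos calculoOptimos calculoOptimos_alt
  rcases hPre with hP | hW
  · rw [pvRowB_zero W]
    exact pvFold_nonneg W P hP _ (PySem.Set.ofList [0]) (by decide)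
      (by intro s hs; rw [PySem.Set.mem_ofList, List.mem_singleton] at hs; omega)
  · rw [pvRowB_zero W]
    exact pvFold_neg W hW P _ (PySem.Set.ofList [0]) (by decide)
      (by intro s hs; rw [PySem.Set.mem_ofList, List.mem_singleton] at hs; omega)
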